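-- pv_equiv track=rewrite | github.com/rondelli/myo-tp | 6_sexta_parte/prueba.py | isMaximal
-- ===== SOURCE A (Python) =====
-- from collections import Counter
--
-- def isMaximal(subset, numbers, threshold):
--     subsetCount = Counter(subset)
--     numbersCount = Counter(numbers)
--     currentSum = sum(subset)
--
--     for num in numbersCount:
--         if subsetCount[num] < numbersCount[num]:
--             if currentSum + num <= threshold:
--                 return False
--     return True
-- ===== SOURCE B (Python) =====
-- def isMaximal(subset, numbers, threshold):
--     s = sum(subset)
--     rest = sorted(subset)
--     for x in sorted(numbers):
--         while rest and rest[0] < x: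
--             rest.pop(0)
--         if rest and rest[0] == x:
--             rest.pop(0)
--         else:
--             return s + x > threshold
--     return True
-- ===== Notes on version B (the rewrite author's own statement) =====
-- stated objective: alternative
-- what changed: Replaces the Counter-based per-key threshold scan by sorting both lists and running a two-pointer merge that finds the first (smallest) number of numbers not matched in subset, then makes a single threshold comparison with it.
import Mathlib
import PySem

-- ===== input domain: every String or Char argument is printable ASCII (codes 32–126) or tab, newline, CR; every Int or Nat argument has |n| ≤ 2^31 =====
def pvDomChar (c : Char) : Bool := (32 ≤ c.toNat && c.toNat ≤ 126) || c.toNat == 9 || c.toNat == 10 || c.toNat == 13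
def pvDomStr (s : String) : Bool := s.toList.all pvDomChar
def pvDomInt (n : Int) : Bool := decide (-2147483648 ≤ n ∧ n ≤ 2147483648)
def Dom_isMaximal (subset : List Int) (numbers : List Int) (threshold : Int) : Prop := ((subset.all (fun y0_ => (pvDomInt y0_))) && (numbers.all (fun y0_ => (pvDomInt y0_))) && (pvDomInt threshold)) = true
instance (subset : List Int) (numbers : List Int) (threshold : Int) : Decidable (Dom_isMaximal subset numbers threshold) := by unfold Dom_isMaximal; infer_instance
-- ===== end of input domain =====

-- B replaces A's Counter-based per-key threshold scan by sorting both lists and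
-- a two-pointer merge that finds the smallest unmatched number, then one comparison
-- (objective: alternative; return-value equivalence — B does not mutate its arguments).


-- ===== PORT A =====
-- the 'for num in numbersCount: … return False' loop, with early return
def isMaximalLoop (subsetCount numbersCount : PySem.Dict Int Int)
    (currentSum threshold : Int) : List Int → Bool
  | [] => true
  | num :: rest =>
    if subsetCount.getD num 0 < numbersCount.getD num 0 then
      if currentSum + num ≤ threshold then false
      else isMaximalLoop subsetCount numbersCount currentSum threshold rest
    else isMaximalLoop subsetCount numbersCount currentSum threshold rest

def isMaximal (subset : List Int) (numbers : List Int) (threshold : Int) : Bool :=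
  let subsetCount := PySem.Dict.counter subset
  let numbersCount := PySem.Dict.counter numbers
  let currentSum := subset.foldl (· + ·) 0
  isMaximalLoop subsetCount numbersCount currentSum threshold numbersCount.keys

-- ===== PORT B =====
-- 'while rest and rest[0] < x: rest.pop(0)'
def dropLt (x : Int) : List Int → List Int
  | [] => []
  | y :: ys => if y < x then dropLt x ys else y :: ys

-- 'for x in sorted(numbers): … ' with the running rest list
def mergeLoop (s t : Int) : List Int → List Int → Bool
  | [], _ => true
  | x :: ns, rest =>
    match dropLt x rest with
    | y :: r' => if y = x then mergeLoop s t ns r' else decide (t < s + x)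
    | [] => decide (t < s + x)

def isMaximal_alt (subset : List Int) (numbers : List Int) (threshold : Int) : Bool :=
  let s := subset.foldl (· + ·) 0
  mergeLoop s threshold (PySem.List.sorted numbers (fun x => x) false)
    (PySem.List.sorted subset (fun x => x) false)

-- ===== PRECONDITION & SPEC =====
def Spec_isMaximal (subset : List Int) (numbers : List Int) (threshold : Int) (out : Bool) : Prop := out = isMaximal_alt subset numbers threshold
instance (subset : List Int) (numbers : List Int) (threshold : Int) (out : Bool) : Decidable (Spec_isMaximal subset numbers threshold out) := by unfold Spec_isMaximal; infer_instance

-- ===== CLAIM (what is proved, stated in full; the proofs are below) =====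
def Claim_equal_isMaximal : Prop := ∀ (subset : List Int) (numbers : List Int) (threshold : Int), Dom_isMaximal subset numbers threshold → Spec_isMaximal subset numbers threshold (isMaximal subset numbers threshold)

-- ===== LEMMAS AND PROOFS =====

-- A's early-return loop is an 'all' over the available keys
theorem isMaximalLoop_eq (sc nc : PySem.Dict Int Int) (s t : Int) (ks : List Int) :
    isMaximalLoop sc nc s t ks =
      (ks.filter (fun k => sc.getD k 0 < nc.getD k 0)).all (fun k => decide (t < s + k)) := by
  induction ks with
  | nil => rfl
  | cons k rest ih =>
    simp only [isMaximalLoop, List.filter_cons]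
    by_cases h1 : sc.getD k 0 < nc.getD k 0
    · by_cases h2 : s + k ≤ t
      · simp [h1, h2, ih]
      · simp [h1, h2, ih]; omega
    · simp [h1, ih]

-- dropLt only drops elements < x, so counts of keys ≥ x are unchanged
theorem count_dropLt (x k : Int) (h : x ≤ k) :
    ∀ ss : List Int, (dropLt x ss).count k = ss.count k := by
  intro ss
  induction ss with
  | nil => rfl
  | cons y ys ih =>
    simp only [dropLt]
    by_cases hy : y < x
    · have : y ≠ k := by omega
      simp [hy, ih, this]
    · simp [hy]

theorem dropLt_sublist (x : Int) : ∀ ss : List Int, (dropLt x ss).Sublist ss := by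
  intro ss
  induction ss with
  | nil => exact List.Sublist.refl _
  | cons y ys ih =>
    simp only [dropLt]
    by_cases hy : y < x
    · simpa [hy] using ih.trans (List.sublist_cons_self y ys)
    · simp [hy]

theorem dropLt_head_ge (x y : Int) : ∀ ss r' , dropLt x ss = y :: r' → x ≤ y := by
  intro ss
  induction ss with
  | nil => intro r' h; simp [dropLt] at h
  | cons z zs ih =>
    intro r' h
    simp only [dropLt] at h
    by_cases hz : z < x
    · rw [if_pos hz] at h; exact ih r' h
    · rw [if_neg hz] at h; cases h; omega

-- the merge scan over two sorted lists decides the universal threshold condition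
theorem mergeLoop_eq (s t : Int) :
    ∀ (ns ss : List Int), ns.Pairwise (· ≤ ·) → ss.Pairwise (· ≤ ·) →
      mergeLoop s t ns ss
        = decide (∀ k ∈ ns, ss.count k < ns.count k → t < s + k) := by
  intro ns
  induction ns with
  | nil =>
    intro ss _ _
    simp [mergeLoop]
  | cons x ns' ih =>
    intro ss hns hss
    have hx : ∀ y ∈ ns', x ≤ y := fun y hy => List.rel_of_pairwise_cons hns hy
    have hns' : ns'.Pairwise (· ≤ ·) := hns.of_cons
    have hr : (dropLt x ss).Pairwise (· ≤ ·) :=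
      List.Pairwise.sublist (dropLt_sublist x ss) hss
    simp only [mergeLoop]
    cases hd : dropLt x ss with
    | nil =>
      have hcx : ss.count x = 0 := by
        have := count_dropLt x x le_rfl ss
        rw [hd] at this; simpa using this.symm
      rw [Bool.eq_iff_iff]
      simp only [decide_eq_true_eq]
      constructor
      · intro h k hk _
        rcases List.mem_cons.mp hk with rfl | hk2
        · omega
        · have := hx k hk2; omega
      · intro h
        exact h x (by simp) (by simp [hcx, List.count_cons_self])
    | cons y r' =>
      dsimp only
      have hxy : x ≤ y := dropLt_head_ge x y ss r' hd
      have hr' : r'.Pairwise (· ≤ ·) := (hd ▸ hr).of_cons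
      by_cases hyx : y = x
      · subst hyx
        rw [if_pos rfl, ih r' hns' hr', decide_eq_decide]
        have hceq : ∀ k, y ≤ k → ss.count k = r'.count k + (if y = k then 1 else 0) := by
          intro k hk
          have hc := count_dropLt y k hk ss
          rw [hd] at hc
          simp only [List.count_cons, beq_iff_eq] at hc ⊢
          omega
        constructor
        · intro h k hk hkc
          -- h : over ns'/r'; goal for k ∈ y :: ns' over ss
          rcases List.mem_cons.mp hk with rfl | hk2
          · have hc := hceq k le_rfl
            rw [if_pos rfl] at hc
            have hcnt : (k :: ns').count k = ns'.count k + 1 := by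
              simp
            rw [hcnt] at hkc
            have hkm : k ∈ ns' := List.count_pos_iff.mp (by omega)
            exact h k hkm (by omega)
          · have hyk : y ≤ k := hx k hk2
            have hc := hceq k hyk
            have hcnt : (y :: ns').count k = ns'.count k + (if y = k then 1 else 0) := by
              simp only [List.count_cons, beq_iff_eq]
            rw [hcnt] at hkc
            by_cases hky : y = k
            · rw [if_pos hky] at hc hkc; exact h k hk2 (by omega)
            · rw [if_neg hky] at hc hkc; exact h k hk2 (by omega)
        · intro h k hk hkc
          -- h : over y::ns'/ss; goal for k ∈ ns' over r'
          have hyk : y ≤ k := hx k hk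
          have hc := hceq k hyk
          refine h k (List.mem_cons_of_mem _ hk) ?_
          have hcnt : (y :: ns').count k = ns'.count k + (if y = k then 1 else 0) := by
            simp only [List.count_cons, beq_iff_eq]
          rw [hcnt]
          by_cases hky : y = k
          · rw [if_pos hky] at hc ⊢; omega
          · rw [if_neg hky] at hc ⊢; omega
      · have hxy' : x < y := lt_of_le_of_ne hxy (Ne.symm hyx)
        rw [if_neg hyx]
        have hcx : ss.count x = 0 := by
          have h1 := count_dropLt x x le_rfl ss
          rw [hd] at h1
          have hr'x : r'.count x = 0 := by
            rw [List.count_eq_zero]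
            intro hmem
            have := List.rel_of_pairwise_cons (hd ▸ hr) hmem
            omega
          simp [hyx, hr'x] at h1
          omega
        rw [Bool.eq_iff_iff]
        simp only [decide_eq_true_eq]
        constructor
        · intro h k hk _
          rcases List.mem_cons.mp hk with rfl | hk2
          · omega
          · have := hx k hk2; omega
        · intro h
          exact h x (by simp) (by simp [hcx, List.count_cons_self])

-- ===== VERDICT (by name: the statement is the Claim_ definition above) =====
theorem isMaximal_spec : Claim_equal_isMaximal := by
  intro subset numbers threshold _
  unfold Spec_isMaximal isMaximal isMaximal_alt
  simp only [isMaximalLoop_eq, PySem.Dict.keys_counter]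
  rw [mergeLoop_eq _ _ _ _ (PySem.List.sorted_pairwise numbers (fun x => x))
    (PySem.List.sorted_pairwise subset (fun x => x))]
  have hcn : ∀ k : Int, (PySem.List.sorted numbers (fun x => x) false).count k = numbers.count k :=
    fun k => (PySem.List.sorted_perm numbers (fun x => x) false).count_eq k
  have hcs : ∀ k : Int, (PySem.List.sorted subset (fun x => x) false).count k = subset.count k :=
    fun k => (PySem.List.sorted_perm subset (fun x => x) false).count_eq k
  set s := subset.foldl (· + ·) 0
  rw [Bool.eq_iff_iff]
  simp only [List.all_eq_true, List.mem_filter, decide_eq_true_eq,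
    PySem.Dict.getD_counter, hcn, hcs, PySem.List.mem_sorted, PySem.Set.mem_ofList]
  constructor
  · intro h k hk1 hk2
    exact h k ⟨hk1, by exact_mod_cast hk2⟩
  · intro h k hk
    obtain ⟨hmem, hlt⟩ := hk
    exact h k hmem (by omega)
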